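-- pv_equiv track=rewrite | github.com/Sayantan-coder/Python-Easy-Level-Practice | sum_of_vowels.py | sum_of_vowels
-- ===== SOURCE A (Python) =====
-- def sum_of_vowels(sentence: str):
--     vowels_list = ["a", "e", "i", "o", "u"]
--     vowels_dictionary = {"a": 4, "e": 3, "i": 1, "o": 0, "u": 0}
--     sum = 0
--     for word in sentence:
--         for char in word.lower():
--             if char in vowels_list:
--                 sum += vowels_dictionary[char]
--     return sum
-- ===== SOURCE B (Python) =====
-- def sum_of_vowels(sentence: str):
--     counts = {}
--     for word in sentence:
--         for ch in word.lower():
--             counts[ch] = counts.get(ch, 0) + 1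
--     return 4 * counts.get("a", 0) + 3 * counts.get("e", 0) + counts.get("i", 0)
-- ===== Notes on version B (the rewrite author's own statement) =====
-- stated objective: idiomatic
-- what changed: Replaces the per-character vowel-membership guard and dict lookup inside the loop with a count-all-characters frequency table built first, then a single fixed weighted sum 4*a+3*e+i over it.
import Mathlib
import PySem

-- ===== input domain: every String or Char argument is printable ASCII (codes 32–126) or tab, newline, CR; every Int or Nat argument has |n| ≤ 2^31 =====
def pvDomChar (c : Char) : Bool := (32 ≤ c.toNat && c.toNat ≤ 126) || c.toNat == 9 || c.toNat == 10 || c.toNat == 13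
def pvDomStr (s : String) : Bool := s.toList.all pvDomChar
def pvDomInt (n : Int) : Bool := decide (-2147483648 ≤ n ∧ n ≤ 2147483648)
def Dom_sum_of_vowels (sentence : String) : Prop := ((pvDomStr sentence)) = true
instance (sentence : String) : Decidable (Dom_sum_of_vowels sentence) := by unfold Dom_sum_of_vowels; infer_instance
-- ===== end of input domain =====

-- B builds a frequency table of all lowercased characters first and then takes a fixed
-- weighted sum 4*a+3*e+i over it, instead of A's membership-guarded per-character accumulation.

-- ===== PORT A =====
-- iterating a str yields its characters; word.lower() on a 1-char word is PySem.Chars.lower [word];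
-- vowels_dictionary[char] is always present when the guard holds, so getD 0 is exact here.
def sum_of_vowels (sentence : String) : Int :=
  let vowels_list : List Char := ['a', 'e', 'i', 'o', 'u']
  let vowels_dictionary : PySem.Dict Char Int :=
    PySem.Dict.ofList [('a', 4), ('e', 3), ('i', 1), ('o', 0), ('u', 0)]
  sentence.toList.foldl (fun sum word =>
    (PySem.Chars.lower [word]).foldl (fun sum char =>
      if char ∈ vowels_list then sum + vowels_dictionary.getD char 0 else sum) sum) 0

-- ===== PORT B =====
def sum_of_vowels_alt (sentence : String) : Int :=
  let counts : PySem.Dict Char Int :=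
    sentence.toList.foldl (fun counts word =>
      (PySem.Chars.lower [word]).foldl (fun counts ch => counts.modify ch 0 (· + 1)) counts)
      PySem.Dict.empty
  4 * counts.getD 'a' 0 + 3 * counts.getD 'e' 0 + counts.getD 'i' 0

-- ===== PRECONDITION & SPEC =====
def Spec_sum_of_vowels (sentence : String) (out : Int) : Prop := out = sum_of_vowels_alt sentence
instance (sentence : String) (out : Int) : Decidable (Spec_sum_of_vowels sentence out) := by unfold Spec_sum_of_vowels; infer_instance

-- ===== CLAIM (what is proved, stated in full; the proofs are below) =====
def Claim_equal_sum_of_vowels : Prop := ∀ (sentence : String), Dom_sum_of_vowels sentence → Spec_sum_of_vowels sentence (sum_of_vowels sentence)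

-- ===== LEMMAS AND PROOFS =====

-- both nested folds collapse to folds over the lowercased character list
theorem pv_fold_lower (l : List Char) {α : Type} (s : α) (f : α → Char → α) :
    l.foldl (fun s w => (PySem.Chars.lower [w]).foldl f s) s
      = (l.map PySem.Chars.lowerChar).foldl f s := by
  rw [List.foldl_map]
  simp [PySem.Chars.lower]

-- the weighted membership sum equals the weighted character counts
theorem pv_weighted (l : List Char) (s : Int) :
    l.foldl (fun sum char =>
      if char ∈ (['a', 'e', 'i', 'o', 'u'] : List Char) then
        sum + (PySem.Dict.ofList [('a', (4:Int)), ('e', 3), ('i', 1), ('o', 0), ('u', 0)]).getD char 0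
      else sum) s
      = s + 4 * (l.count 'a' : Int) + 3 * (l.count 'e' : Int) + (l.count 'i' : Int) := by
  have h4 : (PySem.Dict.ofList [('a', (4:Int)), ('e', 3), ('i', 1), ('o', 0), ('u', 0)]).getD 'a' 0 = 4 := by decide
  have h3 : (PySem.Dict.ofList [('a', (4:Int)), ('e', 3), ('i', 1), ('o', 0), ('u', 0)]).getD 'e' 0 = 3 := by decide
  have h1 : (PySem.Dict.ofList [('a', (4:Int)), ('e', 3), ('i', 1), ('o', 0), ('u', 0)]).getD 'i' 0 = 1 := by decide
  have ho0 : (PySem.Dict.ofList [('a', (4:Int)), ('e', 3), ('i', 1), ('o', 0), ('u', 0)]).getD 'o' 0 = 0 := by decide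
  have hu0 : (PySem.Dict.ofList [('a', (4:Int)), ('e', 3), ('i', 1), ('o', 0), ('u', 0)]).getD 'u' 0 = 0 := by decide
  induction l generalizing s with
  | nil => simp
  | cons c t ih =>
    simp only [List.foldl, ih, List.count_cons]
    by_cases ha : c = 'a'
    · subst ha; simp [h4]; ring
    · by_cases he : c = 'e'
      · subst he; simp [h3]; ring
      · by_cases hi : c = 'i'
        · subst hi; simp [h1, ha, he]; ring
        · by_cases hoc : c = 'o'
          · subst hoc; simp [ho0, ha, he, hi]
          · by_cases hu : c = 'u'
            · subst hu; simp [hu0, ha, he, hi, hoc]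
            · simp [ha, he, hi, hoc, hu]

-- ===== VERDICT (by name: the statement is the Claim_ definition above) =====
theorem sum_of_vowels_spec : Claim_equal_sum_of_vowels := by
  intro sentence _
  unfold Spec_sum_of_vowels sum_of_vowels sum_of_vowels_alt
  rw [pv_fold_lower, pv_fold_lower, pv_weighted]
  simp [PySem.Dict.getD_foldl_modify_add_one]
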